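-- pv_equiv track=rewrite | github.com/malaonda222/Python | Esercizi/RECUPERO5/EsercizioMatrici.py | caricoMin
-- ===== SOURCE A (Python) =====
-- def calcolaCarico(matrix: list[list[int]], r: int, c: int):
--     somma_riga = 0
--     somma_colonna = 0
--     for j in range(len(matrix[r])):
--         somma_riga += matrix[r][j]
--     for i in range(len(matrix)):
--         somma_colonna += matrix[i][c]
--
--     k = (somma_riga - somma_colonna)
--     return k
--
-- def caricoMin(matrix: list[list[int]]):
--     righe = len(matrix)
--     colonne = len(matrix[0])
--     min_carico = None
--     min_posizione = (0, 0)
--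
--     for r in range(righe):
--         for c in range(colonne):
--             calcolo = calcolaCarico(matrix, r, c)
--             if min_carico is None or calcolo < min_carico:
--                 min_carico = calcolo
--                 min_posizione = (r, c)
--     return min_posizione, min_carico
-- ===== SOURCE B (Python) =====
-- def caricoMin(matrix: list[list[int]]):
--     # Precompute all row sums and the column sums once, then pick the
--     # (first) row with minimal sum and the (first) column with maximal sum.
--     rowsums = [sum(row) for row in matrix]
--     colsums = [sum(row[c] for row in matrix) for c in range(len(matrix[0]))]
--     br = 0
--     for i in range(1, len(rowsums)):
--         if rowsums[i] < rowsums[br]: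
--             br = i
--     bc = 0
--     for j in range(1, len(colsums)):
--         if colsums[j] > colsums[bc]:
--             bc = j
--     return (br, bc), rowsums[br] - colsums[bc]
-- ===== Notes on version B (the rewrite author's own statement) =====
-- stated objective: faster
-- what changed: A recomputes the row sum and column sum from scratch for every cell (O(R*C*(R+C))); B computes all row sums and column sums once and then, since carico(r,c)=rowsum[r]-colsum[c] is separable, takes the first row of minimal sum and the first column of maximal sum with two linear scans and never iterates over cells at all.
-- outside the precondition, e.g. on caricoMin([[]]): A returns ((0, 0), None), B raises IndexError
import Mathlib
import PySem

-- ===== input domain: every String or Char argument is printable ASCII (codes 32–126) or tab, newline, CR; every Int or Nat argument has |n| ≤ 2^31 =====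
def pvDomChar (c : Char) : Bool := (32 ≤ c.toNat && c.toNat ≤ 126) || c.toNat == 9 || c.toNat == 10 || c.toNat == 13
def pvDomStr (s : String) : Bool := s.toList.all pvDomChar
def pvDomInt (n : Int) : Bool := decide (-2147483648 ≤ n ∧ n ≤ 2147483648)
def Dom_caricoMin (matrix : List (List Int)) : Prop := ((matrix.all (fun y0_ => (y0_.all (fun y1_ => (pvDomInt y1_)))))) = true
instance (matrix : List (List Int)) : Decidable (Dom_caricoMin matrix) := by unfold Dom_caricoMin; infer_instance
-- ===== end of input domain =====

-- B precomputes every row sum and column sum once and, because carico(r,c) = rowsum r - colsum c is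
-- separable, picks the first row of minimal sum and first column of maximal sum by two linear scans
-- instead of A's per-cell recomputation (objective: faster, asymptotically fewer additions).

-- ===== PORT A =====
def calcolaCarico (matrix : List (List Int)) (r c : Int) : Int :=
  let row := PySem.List.pyGetD matrix r []
  let somma_riga := (PySem.List.pyRange 0 (row.length : Int) 1).foldl
      (fun s j => s + PySem.List.pyGetD row j 0) 0
  let somma_colonna := (PySem.List.pyRange 0 (matrix.length : Int) 1).foldl
      (fun s i => s + PySem.List.pyGetD (PySem.List.pyGetD matrix i []) c 0) 0
  somma_riga - somma_colonna

def caricoMin (matrix : List (List Int)) : (Int × Int) × Int :=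
  let righe : Int := matrix.length
  let colonne : Int := (PySem.List.pyGetD matrix 0 []).length
  let st := (PySem.List.pyRange 0 righe 1).foldl (fun st r =>
      (PySem.List.pyRange 0 colonne 1).foldl (fun st c =>
        let calcolo := calcolaCarico matrix r c
        match st.1 with
        | none => (some calcolo, (r, c))
        | some m => if calcolo < m then (some calcolo, (r, c)) else st) st)
    ((none : Option Int), ((0 : Int), (0 : Int)))
  (st.2, st.1.getD 0)

-- ===== PORT B =====
def caricoMin_alt (matrix : List (List Int)) : (Int × Int) × Int :=
  let rowsums := matrix.map List.sum
  let colonne : Int := (PySem.List.pyGetD matrix 0 []).length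
  let colsums := (PySem.List.pyRange 0 colonne 1).map (fun c =>
      matrix.foldl (fun s row => s + PySem.List.pyGetD row c 0) 0)
  let br := (PySem.List.pyRange 1 (rowsums.length : Int) 1).foldl
      (fun bi i => if PySem.List.pyGetD rowsums i 0 < PySem.List.pyGetD rowsums bi 0 then i else bi) 0
  let bc := (PySem.List.pyRange 1 (colsums.length : Int) 1).foldl
      (fun bj j => if PySem.List.pyGetD colsums bj 0 < PySem.List.pyGetD colsums j 0 then j else bj) 0
  ((br, bc), PySem.List.pyGetD rowsums br 0 - PySem.List.pyGetD colsums bc 0)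

-- ===== PRECONDITION & SPEC =====
-- Pre_ excludes exactly the inputs where A raises IndexError (empty matrix, or a later row shorter
-- than the first row) and the matrices whose first row is empty, on which A returns ((0,0), None) —
-- None is not a value of the declared Int result type.
def Pre_caricoMin (matrix : List (List Int)) : Prop :=
  matrix ≠ [] ∧ 0 < (matrix.headD []).length ∧ ∀ row ∈ matrix, (matrix.headD []).length ≤ row.length
instance (matrix : List (List Int)) : Decidable (Pre_caricoMin matrix) := by
  unfold Pre_caricoMin; infer_instance

def pvWitness_caricoMin : List (List Int) := [[1, 2], [3, 4]]

def Spec_caricoMin (matrix : List (List Int)) (out : (Int × Int) × Int) : Prop := out = caricoMin_alt matrix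
instance (matrix : List (List Int)) (out : (Int × Int) × Int) : Decidable (Spec_caricoMin matrix out) := by unfold Spec_caricoMin; infer_instance

-- ===== CLAIM (what is proved, stated in full; the proofs are below) =====
def Claim_equal_caricoMin : Prop := ∀ (matrix : List (List Int)), Dom_caricoMin matrix → Pre_caricoMin matrix → Spec_caricoMin matrix (caricoMin matrix)

-- ===== LEMMAS AND PROOFS =====

-- row sum, column sum, per-cell value, and the row-major list of cells
def pvRS (matrix : List (List Int)) (r : Int) : Int := (PySem.List.pyGetD matrix r []).sum
def pvCS (matrix : List (List Int)) (c : Int) : Int :=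
  matrix.foldl (fun s row => s + PySem.List.pyGetD row c 0) 0
def pvF (matrix : List (List Int)) (p : Int × Int) : Int := pvRS matrix p.1 - pvCS matrix p.2
def pvP (R C : Int) : List (Int × Int) :=
  (PySem.List.pyRange 0 R 1).flatMap (fun r => (PySem.List.pyRange 0 C 1).map (fun c => (r, c)))
def pvLex (a b : Int × Int) : Prop := a.1 < b.1 ∨ (a.1 = b.1 ∧ a.2 < b.2)
def pvStep (f : (Int × Int) → Int) (st : Option Int × (Int × Int)) (x : Int × Int) :
    Option Int × (Int × Int) :=
  match st.1 with
  | none => (some (f x), x)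
  | some m => if f x < m then (some (f x), x) else st

theorem pvCalc_eq (matrix : List (List Int)) (r c : Int) :
    calcolaCarico matrix r c = pvRS matrix r - pvCS matrix c := by
  unfold calcolaCarico pvRS pvCS
  dsimp only
  rw [PySem.List.foldl_pyRange_zero_pyGetD' (PySem.List.pyGetD matrix r []) 0
        (fun s x => s + x) 0,
      PySem.List.foldl_pyRange_zero_pyGetD' matrix []
        (fun s row => s + PySem.List.pyGetD row c 0) 0,
      List.sum_eq_foldl]

theorem pvFold_eq_P (matrix : List (List Int)) :
    (PySem.List.pyRange 0 (matrix.length : Int) 1).foldl (fun st r =>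
      (PySem.List.pyRange 0 ((PySem.List.pyGetD matrix 0 []).length : Int) 1).foldl (fun st c =>
        let calcolo := calcolaCarico matrix r c
        match st.1 with
        | none => (some calcolo, (r, c))
        | some m => if calcolo < m then (some calcolo, (r, c)) else st) st)
      ((none : Option Int), ((0 : Int), (0 : Int)))
    = (pvP (matrix.length : Int) ((PySem.List.pyGetD matrix 0 []).length : Int)).foldl
        (pvStep (pvF matrix)) ((none : Option Int), ((0 : Int), (0 : Int))) := by
  unfold pvP
  rw [List.foldl_flatMap]
  simp only [List.foldl_map]
  congr 1
  funext st r
  congr 1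
  funext st c
  rcases st with ⟨mo, p⟩
  cases mo <;> simp [pvStep, pvF, pvCalc_eq]

theorem pvStep_foldl_some (f : (Int × Int) → Int) :
    ∀ (L : List (Int × Int)) (m : Int) (p : Int × Int),
      ((∀ x ∈ L, m ≤ f x) ∧ L.foldl (pvStep f) (some m, p) = (some m, p))
    ∨ (∃ i, ∃ hi : i < L.length, L.foldl (pvStep f) (some m, p) = (some (f L[i]), L[i]) ∧
        f L[i] < m ∧ (∀ x ∈ L, f L[i] ≤ f x) ∧ (∀ j, (hj : j < i) → f L[i] < f L[j])) := by
  intro L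
  induction L with
  | nil => intro m p; exact Or.inl ⟨by simp, rfl⟩
  | cons x t ih =>
    intro m p
    have hstep : (x :: t).foldl (pvStep f) (some m, p)
        = t.foldl (pvStep f) (if f x < m then (some (f x), x) else (some m, p)) := by
      simp only [List.foldl_cons, pvStep]
    by_cases hx : f x < m
    · rw [hstep, if_pos hx]
      rcases ih (f x) x with ⟨hall, heq⟩ | ⟨i, hi, heq, hlt, hall, hstrict⟩
      · refine Or.inr ⟨0, by simp, by simpa using heq, hx, ?_, by omega⟩
        intro y hy
        rcases List.mem_cons.mp hy with rfl | hy
        · simp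
        · simpa using hall y hy
      · refine Or.inr ⟨i + 1, by simpa using Nat.succ_lt_succ hi, by simpa using heq,
          lt_trans hlt hx, ?_, ?_⟩
        · intro y hy
          rcases List.mem_cons.mp hy with rfl | hy
          · exact le_of_lt (by simpa using hlt)
          · simpa using hall y hy
        · intro j hj
          match j with
          | 0 => simpa using hlt
          | Nat.succ j' => simpa using hstrict j' (by omega)
    · rw [hstep, if_neg hx]
      rcases ih m p with ⟨hall, heq⟩ | ⟨i, hi, heq, hlt, hall, hstrict⟩
      · refine Or.inl ⟨?_, heq⟩
        intro y hy
        rcases List.mem_cons.mp hy with rfl | hy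
        · exact le_of_not_gt hx
        · exact hall y hy
      · refine Or.inr ⟨i + 1, by simpa using Nat.succ_lt_succ hi, by simpa using heq,
          by simpa using hlt, ?_, ?_⟩
        · intro y hy
          rcases List.mem_cons.mp hy with rfl | hy
          · exact le_of_lt (lt_of_lt_of_le (by simpa using hlt) (le_of_not_gt hx))
          · simpa using hall y hy
        · intro j hj
          match j with
          | 0 =>
            simpa using lt_of_lt_of_le (show f t[i] < m by simpa using hlt) (le_of_not_gt hx)
          | Nat.succ j' => simpa using hstrict j' (by omega)

theorem pvStep_foldl_none (f : (Int × Int) → Int) (L : List (Int × Int)) (p0 : Int × Int)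
    (hL : L ≠ []) :
    ∃ i, ∃ hi : i < L.length, L.foldl (pvStep f) (none, p0) = (some (f L[i]), L[i]) ∧
      (∀ y ∈ L, f L[i] ≤ f y) ∧ (∀ j, (hj : j < i) → f L[i] < f L[j]) := by
  match L, hL with
  | x :: t, _ =>
    have hstep : (x :: t).foldl (pvStep f) (none, p0)
        = t.foldl (pvStep f) (some (f x), x) := by
      simp only [List.foldl_cons, pvStep]
    rcases pvStep_foldl_some f t (f x) x with ⟨hall, heq⟩ | ⟨i, hi, heq, hlt, hall, hstrict⟩
    · refine ⟨0, by simp, by simpa [hstep] using heq, ?_, by omega⟩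
      intro y hy
      rcases List.mem_cons.mp hy with rfl | hy
      · simp
      · simpa using hall y hy
    · refine ⟨i + 1, by simpa using Nat.succ_lt_succ hi, by simpa [hstep] using heq, ?_, ?_⟩
      · intro y hy
        rcases List.mem_cons.mp hy with rfl | hy
        · exact le_of_lt (by simpa using hlt)
        · simpa using hall y hy
      · intro j hj
        match j with
        | 0 => simpa using hlt
        | Nat.succ j' => simpa using hstrict j' (by omega)

theorem pvPairwise_flatMap (rs cs : List Int) (h1 : rs.Pairwise (· < ·))
    (h2 : cs.Pairwise (· < ·)) :
    (rs.flatMap (fun r => cs.map (fun c => (r, c)))).Pairwise pvLex := by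
  induction rs with
  | nil => simp
  | cons r rs ih =>
    rw [List.flatMap_cons, List.pairwise_append]
    refine ⟨?_, ih (List.Pairwise.of_cons h1), ?_⟩
    · rw [List.pairwise_map]
      exact h2.imp (fun hlt => Or.inr ⟨rfl, hlt⟩)
    · intro a ha b hb
      obtain ⟨c, _, rfl⟩ := List.mem_map.mp ha
      obtain ⟨r', hr', hb'⟩ := List.mem_flatMap.mp hb
      obtain ⟨c', _, rfl⟩ := List.mem_map.mp hb'
      exact Or.inl ((List.pairwise_cons.mp h1).1 r' hr')

theorem pvP_pairwise (R C : Int) : (pvP R C).Pairwise pvLex :=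
  pvPairwise_flatMap _ _ (PySem.List.pairwise_lt_pyRange_one 0 R)
    (PySem.List.pairwise_lt_pyRange_one 0 C)

theorem pvP_mem (R C : Int) (y : Int × Int) :
    y ∈ pvP R C ↔ 0 ≤ y.1 ∧ y.1 < R ∧ 0 ≤ y.2 ∧ y.2 < C := by
  unfold pvP
  simp only [List.mem_flatMap, List.mem_map, PySem.List.mem_pyRange_one]
  constructor
  · rintro ⟨r, hr, c, hc, rfl⟩
    exact ⟨hr.1, hr.2, hc.1, hc.2⟩
  · rintro ⟨h1, h2, h3, h4⟩
    exact ⟨y.1, ⟨h1, h2⟩, y.2, ⟨h3, h4⟩, rfl⟩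

-- A's nested loop: the result cell is in range, globally minimal, and strictly better than every
-- row-major-earlier cell.
theorem pvA_char (matrix : List (List Int)) (R C : Int) (hR : R = (matrix.length : Int))
    (hC : C = ((PySem.List.pyGetD matrix 0 []).length : Int)) (hR1 : 1 ≤ R) (hC1 : 1 ≤ C) :
    ∃ q : Int × Int, caricoMin matrix = (q, pvF matrix q) ∧ q ∈ pvP R C ∧
      (∀ y ∈ pvP R C, pvF matrix q ≤ pvF matrix y) ∧
      (∀ y ∈ pvP R C, pvLex y q → pvF matrix q < pvF matrix y) := by
  have hPne : pvP R C ≠ [] := by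
    refine List.ne_nil_of_mem (a := ((0 : Int), (0 : Int))) ?_
    rw [pvP_mem]
    exact ⟨le_refl _, by omega, le_refl _, by omega⟩
  obtain ⟨i, hi, heq, hmin, hstrict⟩ :=
    pvStep_foldl_none (pvF matrix) (pvP R C) ((0 : Int), (0 : Int)) hPne
  refine ⟨(pvP R C)[i], ?_, List.getElem_mem hi, hmin, ?_⟩
  · unfold caricoMin
    dsimp only
    rw [pvFold_eq_P, ← hR, ← hC] at *
    rw [heq]
    rfl
  · intro y hy hlex
    obtain ⟨j, hj, rfl⟩ := List.mem_iff_getElem.mp hy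
    rcases lt_trichotomy j i with h | h | h
    · exact hstrict j h
    · subst h
      exact absurd hlex (by unfold pvLex; omega)
    · have := (List.pairwise_iff_getElem.mp (pvP_pairwise R C)) i j hi hj h
      unfold pvLex at this hlex
      omega

-- B's argmin scan: first index of the minimum
theorem pvFirstMin_fold (g : Int → Int) (n : Int) (hn : 1 ≤ n) :
    let b := (PySem.List.pyRange 1 n 1).foldl
      (fun bi i => if g i < g bi then i else bi) 0
    0 ≤ b ∧ b < n ∧ (∀ j, 0 ≤ j → j < n → g b ≤ g j) ∧ (∀ j, 0 ≤ j → j < b → g b < g j) := by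
  have aux : ∀ (k : Nat) (a bi : Int), (n - a).toNat ≤ k → a ≤ n → 0 ≤ bi → bi < a →
      (∀ j, 0 ≤ j → j < a → g bi ≤ g j) → (∀ j, 0 ≤ j → j < bi → g bi < g j) →
      (let b := (PySem.List.pyRange a n 1).foldl (fun bi i => if g i < g bi then i else bi) bi
       0 ≤ b ∧ b < n ∧ (∀ j, 0 ≤ j → j < n → g b ≤ g j) ∧ (∀ j, 0 ≤ j → j < b → g b < g j)) := by
    intro k
    induction k with
    | zero =>
      intro a bi hk han hbi0 hbia hmin hstrict
      have : a = n := by omega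
      subst this
      rw [PySem.List.pyRange_one_eq_nil (le_refl a)]
      exact ⟨hbi0, hbia, hmin, hstrict⟩
    | succ k ih =>
      intro a bi hk han hbi0 hbia hmin hstrict
      by_cases hlt : a < n
      · rw [PySem.List.pyRange_one_cons hlt, List.foldl_cons]
        by_cases hc : g a < g bi
        · rw [if_pos hc]
          refine ih (a + 1) a (by omega) (by omega) (by omega) (by omega) ?_ ?_
          · intro j hj0 hj
            rcases lt_or_ge j a with h | h
            · exact le_of_lt (lt_of_lt_of_le hc (hmin j hj0 h))
            · have : j = a := by omega
              simp [this]
          · intro j hj0 hj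
            exact lt_of_lt_of_le hc (hmin j hj0 (by omega))
        · rw [if_neg hc]
          refine ih (a + 1) bi (by omega) (by omega) hbi0 (by omega) ?_ hstrict
          intro j hj0 hj
          rcases lt_or_ge j a with h | h
          · exact hmin j hj0 h
          · have : j = a := by omega
            rw [this]
            exact le_of_not_gt hc
      · have : a = n := by omega
        subst this
        rw [PySem.List.pyRange_one_eq_nil (le_refl a)]
        exact ⟨hbi0, hbia, hmin, hstrict⟩
  refine aux (n - 1).toNat 1 0 (by omega) hn (le_refl 0) (by omega) ?_ ?_
  · intro j hj0 hj1
    have hj : j = 0 := by omega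
    subst hj
    exact le_refl _
  · intro j hj0 hj1
    omega

theorem pvFirstMax_fold (g : Int → Int) (n : Int) (hn : 1 ≤ n) :
    let b := (PySem.List.pyRange 1 n 1).foldl
      (fun bi i => if g bi < g i then i else bi) 0
    0 ≤ b ∧ b < n ∧ (∀ j, 0 ≤ j → j < n → g j ≤ g b) ∧ (∀ j, 0 ≤ j → j < b → g j < g b) := by
  intro b
  have hfun : (fun (bi i : Int) => if g bi < g i then i else bi)
      = (fun bi i => if (fun x => -g x) i < (fun x => -g x) bi then i else bi) := by
    funext bi i
    simp only [neg_lt_neg_iff]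
  have h := pvFirstMin_fold (fun x => -g x) n hn
  dsimp only at h
  rw [← hfun] at h
  obtain ⟨h1, h2, h3, h4⟩ := h
  refine ⟨h1, h2, fun j hj0 hj1 => ?_, fun j hj0 hj1 => ?_⟩
  · exact neg_le_neg_iff.mp (h3 j hj0 hj1)
  · exact neg_lt_neg_iff.mp (h4 j hj0 hj1)

-- B's two scans: first row of minimal sum, first column of maximal sum
theorem pvB_char (matrix : List (List Int)) (hR1 : 1 ≤ (matrix.length : Int))
    (hC1 : 1 ≤ ((PySem.List.pyGetD matrix 0 []).length : Int)) :
    ∃ br bc : Int,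
      caricoMin_alt matrix = ((br, bc), pvRS matrix br - pvCS matrix bc) ∧
      0 ≤ br ∧ br < (matrix.length : Int) ∧
      (∀ j, 0 ≤ j → j < (matrix.length : Int) → pvRS matrix br ≤ pvRS matrix j) ∧
      (∀ j, 0 ≤ j → j < br → pvRS matrix br < pvRS matrix j) ∧
      0 ≤ bc ∧ bc < ((PySem.List.pyGetD matrix 0 []).length : Int) ∧
      (∀ j, 0 ≤ j → j < ((PySem.List.pyGetD matrix 0 []).length : Int) →
        pvCS matrix j ≤ pvCS matrix bc) ∧
      (∀ j, 0 ≤ j → j < bc → pvCS matrix j < pvCS matrix bc) := by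
  have hG1 : ∀ j : Int, 0 ≤ j → j < (matrix.length : Int) →
      PySem.List.pyGetD (matrix.map List.sum) j 0 = pvRS matrix j := by
    intro j h0 hj
    rw [PySem.List.pyGetD_eq_getElem (matrix.map List.sum) 0 h0 (by simpa using hj), pvRS,
        PySem.List.pyGetD_eq_getElem matrix [] h0 (by simpa using hj)]
    simp
  have hG2 : ∀ j : Int, 0 ≤ j → j < ((PySem.List.pyGetD matrix 0 []).length : Int) →
      PySem.List.pyGetD
        ((PySem.List.pyRange 0 ((PySem.List.pyGetD matrix 0 []).length : Int) 1).map
          (fun c => matrix.foldl (fun s row => s + PySem.List.pyGetD row c 0) 0)) j 0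
      = pvCS matrix j := by
    intro j h0 hj
    rw [PySem.List.pyGetD_map_pyRange_of_nonneg _ _ _ _ h0 hj]
    rfl
  have hlen1 : ((matrix.map List.sum).length : Int) = (matrix.length : Int) := by simp
  have hlen2 : (((PySem.List.pyRange 0 ((PySem.List.pyGetD matrix 0 []).length : Int) 1).map
      (fun c => matrix.foldl (fun s row => s + PySem.List.pyGetD row c 0) 0)).length : Int)
      = ((PySem.List.pyGetD matrix 0 []).length : Int) := by
    rw [List.length_map, PySem.List.length_pyRange_one]
    omega
  unfold caricoMin_alt
  dsimp only
  rw [hlen1, hlen2]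
  have h1 := pvFirstMin_fold (fun i => PySem.List.pyGetD (matrix.map List.sum) i 0)
    (matrix.length : Int) hR1
  have h2 := pvFirstMax_fold
    (fun j => PySem.List.pyGetD
      ((PySem.List.pyRange 0 ((PySem.List.pyGetD matrix 0 []).length : Int) 1).map
        (fun c => matrix.foldl (fun s row => s + PySem.List.pyGetD row c 0) 0)) j 0)
    ((PySem.List.pyGetD matrix 0 []).length : Int) hC1
  dsimp only at h1 h2
  obtain ⟨hb0, hbn, hbmin, hbstrict⟩ := h1
  obtain ⟨hc0, hcn, hcmax, hcstrict⟩ := h2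
  refine ⟨_, _, ?_, hb0, hbn, ?_, ?_, hc0, hcn, ?_, ?_⟩
  · rw [hG1 _ hb0 hbn, hG2 _ hc0 hcn]
  · intro j h0 hj
    have := hbmin j h0 hj
    rwa [hG1 _ hb0 hbn, hG1 _ h0 hj] at this
  · intro j h0 hj
    have := hbstrict j h0 hj
    rwa [hG1 _ hb0 hbn, hG1 _ h0 (by omega)] at this
  · intro j h0 hj
    have := hcmax j h0 hj
    rwa [hG2 _ hc0 hcn, hG2 _ h0 hj] at this
  · intro j h0 hj
    have := hcstrict j h0 hj
    rwa [hG2 _ hc0 hcn, hG2 _ h0 (by omega)] at this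

-- ===== VERDICT (by name: the statement is the Claim_ definition above) =====
theorem caricoMin_spec : Claim_equal_caricoMin := by
  intro matrix hDom hPre
  unfold Spec_caricoMin
  obtain ⟨hne, hpos, hrows⟩ := hPre
  have hR1 : 1 ≤ (matrix.length : Int) := by
    cases matrix with
    | nil => exact absurd rfl hne
    | cons h t => simp
  have hhead : PySem.List.pyGetD matrix 0 [] = matrix.headD [] := by
    cases matrix with
    | nil => simp [PySem.List.pyGetD_zero]
    | cons h t => simp [PySem.List.pyGetD_zero]
  have hC1 : 1 ≤ ((PySem.List.pyGetD matrix 0 []).length : Int) := by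
    rw [hhead]; exact_mod_cast hpos
  obtain ⟨q, hAeq, hqmem, hAmin, hAstrict⟩ :=
    pvA_char matrix (matrix.length : Int) ((PySem.List.pyGetD matrix 0 []).length : Int)
      rfl rfl hR1 hC1
  obtain ⟨hq1, hq2, hq3, hq4⟩ :=
    (pvP_mem (matrix.length : Int) ((PySem.List.pyGetD matrix 0 []).length : Int) q).mp hqmem
  obtain ⟨br, bc, hBeq, hb0, hbn, hbmin, hbstrict, hc0, hcn, hcmax, hcstrict⟩ :=
    pvB_char matrix hR1 hC1
  -- q.1 is the first index of minimal row sum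
  have hqmin : ∀ j, 0 ≤ j → j < (matrix.length : Int) → pvRS matrix q.1 ≤ pvRS matrix j := by
    intro j h0 hj
    have := hAmin (j, q.2) ((pvP_mem _ _ _).mpr ⟨h0, hj, hq3, hq4⟩)
    simp only [pvF] at this
    linarith
  have hqstrict : ∀ j, 0 ≤ j → j < q.1 → pvRS matrix q.1 < pvRS matrix j := by
    intro j h0 hj
    have := hAstrict (j, q.2) ((pvP_mem _ _ _).mpr ⟨h0, by omega, hq3, hq4⟩) (Or.inl hj)
    simp only [pvF] at this
    linarith
  -- q.2 is the first index of maximal column sum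
  have hqmax : ∀ c, 0 ≤ c → c < ((PySem.List.pyGetD matrix 0 []).length : Int) →
      pvCS matrix c ≤ pvCS matrix q.2 := by
    intro c h0 hc
    have := hAmin (q.1, c) ((pvP_mem _ _ _).mpr ⟨hq1, hq2, h0, hc⟩)
    simp only [pvF] at this
    linarith
  have hqcstrict : ∀ c, 0 ≤ c → c < q.2 → pvCS matrix c < pvCS matrix q.2 := by
    intro c h0 hc
    have := hAstrict (q.1, c) ((pvP_mem _ _ _).mpr ⟨hq1, hq2, h0, by omega⟩)
      (Or.inr ⟨rfl, hc⟩)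
    simp only [pvF] at this
    linarith
  have he1 : q.1 = br := by
    rcases lt_trichotomy q.1 br with h | h | h
    · have h1 := hbstrict q.1 hq1 h
      have h2 := hqmin br hb0 hbn
      linarith
    · exact h
    · have h1 := hqstrict br hb0 h
      have h2 := hbmin q.1 hq1 hq2
      linarith
  have he2 : q.2 = bc := by
    rcases lt_trichotomy q.2 bc with h | h | h
    · have h1 := hcstrict q.2 hq3 h
      have h2 := hqmax bc hc0 hcn
      linarith
    · exact h
    · have h1 := hqcstrict bc hc0 h
      have h2 := hcmax q.2 hq3 hq4
      linarith
  rw [hAeq, hBeq]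
  have hq : q = (br, bc) := Prod.ext he1 he2
  rw [hq]
  rfl
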